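-- pv_equiv track=rewrite | github.com/m00nlight/hackerrank | algorithm/contests/Counter-Code-2015/B.py | solve
-- ===== SOURCE A (Python) =====
-- def solve(n):
--     ret = []
--     if (n % 2 == 0):
--         for i in range(n // 2, 0, -1):
--             ret.append(i)
--             ret.append(n + 1 - i)
--     else:
--         ret.append((n + 1) // 2)
--         for i in range(n // 2, 0, -1):
--             ret.append(i)
--             ret.append(n + 1 - i)
--
--     return ret
-- ===== SOURCE B (Python) =====
-- def solve(n):
--     return sorted(range(1, n + 1), key=lambda x: (abs(2 * x - (n + 1)), x))
-- ===== Notes on version B (the rewrite author's own statement) =====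
-- stated objective: idiomatic
-- what changed: Replaced the explicit outward-pairing loop with its parity branch by a single sort of 1..n keyed by distance from the midpoint (abs(2*x-(n+1))) with the value itself as tie-breaker.
-- intended difference: For negative odd n, A returns [(n+1)//2] because it unconditionally appends the middle element even though the pairing range is empty; B returns [], the intended value for a nonpositive count. — e.g. on solve(-1): A returns [0], B returns []
import Mathlib
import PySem

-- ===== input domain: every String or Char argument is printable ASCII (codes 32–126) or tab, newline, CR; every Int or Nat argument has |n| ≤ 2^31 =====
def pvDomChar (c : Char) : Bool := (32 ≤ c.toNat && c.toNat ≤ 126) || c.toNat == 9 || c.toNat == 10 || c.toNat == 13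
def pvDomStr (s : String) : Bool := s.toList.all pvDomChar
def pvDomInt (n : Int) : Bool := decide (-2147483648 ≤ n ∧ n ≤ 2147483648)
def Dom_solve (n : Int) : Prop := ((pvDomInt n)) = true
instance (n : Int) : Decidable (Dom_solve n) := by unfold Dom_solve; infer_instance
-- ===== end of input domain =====

-- B replaces A's outward-pairing loop with its parity branch by a single sort of 1..n
-- keyed by distance from the midpoint (idiomatic rewrite, same cost class).

-- ===== PORT A =====
def solve (n : Int) : List Int :=
  if PySem.Int.mod n 2 = 0 then
    (PySem.List.pyRange (PySem.Int.floordiv n 2) 0 (-1)).foldl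
      (fun ret i => (ret ++ [i]) ++ [n + 1 - i]) []
  else
    (PySem.List.pyRange (PySem.Int.floordiv n 2) 0 (-1)).foldl
      (fun ret i => (ret ++ [i]) ++ [n + 1 - i]) [PySem.Int.floordiv (n + 1) 2]

-- ===== PORT B =====
-- sorted(range(1, n+1), key=lambda x: (abs(2*x - (n+1)), x)); the lexicographic tuple
-- key is modelled exactly by toLex on Int ×ₗ Int
def solve_alt (n : Int) : List Int :=
  PySem.List.sorted (PySem.List.pyRange 1 (n + 1) 1)
    (fun x => toLex (|2 * x - (n + 1)|, x))

-- ===== PRECONDITION & SPEC =====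
-- For negative odd n, A returns [(n+1)//2] because it unconditionally appends the middle
-- element even though the pairing range is empty; B returns [], the intended value for a
-- nonpositive count.
def D_solve (n : Int) : Prop := n < 0 ∧ ¬ (2 ∣ n)
instance (n : Int) : Decidable (D_solve n) := by unfold D_solve; infer_instance
def Spec_solve (n : Int) (out : List Int) : Prop := ¬ D_solve n → out = solve_alt n
instance (n : Int) (out : List Int) : Decidable (Spec_solve n out) := by unfold Spec_solve; infer_instance
def pvDiffWitness_solve : Int := (-1)
def pvDiffWitnessOut_solve : (List Int) × (List Int) := ([0], [])

-- ===== CLAIM (what is proved, stated in full; the proofs are below) =====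
def Claim_unchanged_solve : Prop := ∀ (n : Int), Dom_solve n → Spec_solve n (solve n)
def Claim_changed_solve : Prop := Dom_solve (pvDiffWitness_solve) ∧ D_solve (pvDiffWitness_solve) ∧ solve (pvDiffWitness_solve) = pvDiffWitnessOut_solve.1 ∧ solve_alt (pvDiffWitness_solve) = pvDiffWitnessOut_solve.2 ∧ pvDiffWitnessOut_solve.1 ≠ pvDiffWitnessOut_solve.2
def Claim_exact_solve : Prop := ∀ (n : Int), Dom_solve n → D_solve n → solve n ≠ solve_alt n

-- ===== LEMMAS AND PROOFS =====

-- one pair appended by A's loop body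
def pvPair (n i : Int) : List Int := [i, n + 1 - i]

-- A's loop output over the descending range k..1 (without the odd-case middle element)
def pvFlat (n : Int) (k : Nat) : List Int :=
  ((List.range k).map (fun j : Nat => (k : Int) - (j:Int))).flatMap (pvPair n)

-- the key B sorts by
def pvKey (n x : Int) : Int ×ₗ Int := toLex (|2 * x - (n + 1)|, x)

lemma pvFlat_succ' (k : Nat) :
    ((List.range (k+1)).map (fun j : Nat => ((k:Int)+1) - (j:Int))) = ((k : Int) + 1) :: ((List.range k).map (fun j : Nat => (k : Int) - (j:Int))) := by
  rw [List.range_succ_eq_map, List.map_cons, List.map_map]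
  norm_num

lemma pvFlat_succ (n : Int) (k : Nat) :
    pvFlat n (k + 1) = ((k : Int) + 1) :: (n - k) :: pvFlat n k := by
  unfold pvFlat
  have h : ((k+1 : Nat) : Int) = (k:Int)+1 := by push_cast; ring
  rw [show ((List.range (k+1)).map (fun j : Nat => ((k+1:Nat) : Int) - (j:Int))) = ((List.range (k+1)).map (fun j : Nat => ((k:Int)+1) - (j:Int))) by rw [h], pvFlat_succ']
  simp [pvPair]

lemma pvRange_desc (a : Int) :
    PySem.List.pyRange a 0 (-1) = (List.range a.toNat).map (fun k : Nat => a - (k:Int)) := by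
  unfold PySem.List.pyRange
  norm_num
  rcases (by omega : a ≤ 0 ∨ 0 < a) with h | h
  · simp [not_lt.mpr h, Int.toNat_of_nonpos h]
  · simp [h, sub_eq_add_neg]

lemma pvRange_nil {a b : Int} (h : b ≤ a) : PySem.List.pyRange a b = [] := by
  rw [PySem.List.pyRange_one]
  simp [Int.toNat_of_nonpos (by omega : b - a ≤ 0)]

lemma pvFlat_perm (n : Int) (k : Nat) (h : 2 * (k : Int) ≤ n) :
    (pvFlat n k).Perm
      (PySem.List.pyRange 1 ((k : Int) + 1) 1 ++ PySem.List.pyRange (n + 1 - k) (n + 1) 1) := by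
  induction k with
  | zero =>
      simp [pvFlat, pvRange_nil (by omega : ((1:Int)) ≤ 1)]
  | succ k ih =>
      push_cast at h
      have hk : 2 * (k : Int) ≤ n := by omega
      have hA : PySem.List.pyRange 1 ((k:Int) + 1 + 1) 1
          = PySem.List.pyRange 1 ((k:Int) + 1) 1 ++ [(k:Int)+1] := by
        rw [PySem.List.pyRange_one_append 1 ((k:Int)+1) ((k:Int)+1+1) (by omega) (by omega),
            PySem.List.pyRange_one_cons (by omega : (k:Int)+1 < (k:Int)+1+1),
            pvRange_nil (by omega : (k:Int)+1+1 ≤ (k:Int)+1+1)]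
      have hB : PySem.List.pyRange (n + 1 - ((k:Int)+1)) (n + 1) 1
          = (n - k) :: PySem.List.pyRange (n + 1 - k) (n + 1) 1 := by
        rw [show n + 1 - ((k:Int) + 1) = n - k by ring,
            PySem.List.pyRange_one_cons (by omega : n - (k:Int) < n + 1),
            show n - (k:Int) + 1 = n + 1 - k by ring]
      rw [pvFlat_succ]
      push_cast
      rw [hA, hB, List.append_assoc, List.singleton_append]
      exact (((ih hk).cons _).cons _).trans
        (((List.perm_middle.symm).cons _).trans List.perm_middle.symm)

lemma pvFlat_bound (n : Int) (k : Nat) (h : 2 * (k : Int) ≤ n) :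
    ∀ x ∈ pvFlat n k, n + 1 - 2 * k ≤ |2 * x - (n + 1)| := by
  induction k with
  | zero => simp [pvFlat]
  | succ k ih =>
      push_cast at h ⊢
      intro x hx
      rw [pvFlat_succ, List.mem_cons, List.mem_cons] at hx
      have habs : -|2 * x - (n + 1)| ≤ 2 * x - (n + 1) ∧ 2 * x - (n + 1) ≤ |2 * x - (n + 1)| :=
        ⟨neg_abs_le _, le_abs_self _⟩
      rcases hx with rfl | rfl | hx
      · omega
      · omega
      · have := ih (by omega) x hx
        omega

lemma pvFlat_pairwise (n : Int) (k : Nat) (h : 2 * (k : Int) ≤ n) :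
    (pvFlat n k).Pairwise (fun a b => pvKey n a < pvKey n b) := by
  induction k with
  | zero => simp [pvFlat]
  | succ k ih =>
      push_cast at h
      rw [pvFlat_succ]
      have hneg : 2 * ((k:Int) + 1) - (n + 1) < 0 := by omega
      have e1 : |2 * ((k:Int) + 1) - (n + 1)| = n - 1 - 2 * k := by
        rw [abs_of_neg hneg]; ring
      have e2 : |2 * (n - (k:Int)) - (n + 1)| = n - 1 - 2 * k := by
        rw [show 2 * (n - (k:Int)) - (n + 1) = -(2 * ((k:Int) + 1) - (n + 1)) by ring, abs_neg, abs_of_neg hneg]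
        ring
      refine List.Pairwise.cons ?_ (List.Pairwise.cons ?_ (ih (by omega)))
      · intro y hy
        rw [List.mem_cons] at hy
        rcases hy with rfl | hy
        · rw [Prod.Lex.lt_iff]
          right
          constructor
          · simp [pvKey, e1, e2]
          · simp [pvKey]; omega
        · have hb := pvFlat_bound n k (by omega) y hy
          rw [Prod.Lex.lt_iff]
          left
          show |2 * ((k:Int) + 1) - (n + 1)| < |2 * y - (n + 1)|
          omega
      · intro y hy
        have hb := pvFlat_bound n k (by omega) y hy
        rw [Prod.Lex.lt_iff]
        left
        show |2 * (n - (k:Int)) - (n + 1)| < |2 * y - (n + 1)|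
        omega

lemma pvFoldl_flat (n : Int) (init : List Int) (L : List Int) :
    L.foldl (fun ret i => (ret ++ [i]) ++ [n + 1 - i]) init = init ++ L.flatMap (pvPair n) := by
  have h : (fun (ret : List Int) i => (ret ++ [i]) ++ [n + 1 - i]) = fun ret i => ret ++ pvPair n i := by
    funext ret i; simp [pvPair]
  rw [h, PySem.List.foldl_append_eq_flatMap]

-- A's loop over descending range k..1, rewritten through pvFlat
lemma pvLoop_eq (n : Int) (init : List Int) (k : Nat) :
    (PySem.List.pyRange (k : Int) 0 (-1)).foldl
      (fun ret i => (ret ++ [i]) ++ [n + 1 - i]) init = init ++ pvFlat n k := by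
  rw [pvRange_desc, pvFoldl_flat, Int.toNat_natCast]
  rfl

lemma pvAlt_even (n : Int) (k : Nat) (hn : n = 2 * k) :
    solve_alt n = pvFlat n k := by
  unfold solve_alt
  apply PySem.List.sorted_eq_of_perm_of_pairwise_lt
  · refine (pvFlat_perm n k (by omega)).trans ?_
    rw [show n + 1 - (k:Int) = (k:Int) + 1 by omega,
        ← PySem.List.pyRange_one_append 1 ((k:Int)+1) (n+1) (by omega) (by omega)]
  · exact pvFlat_pairwise n k (by omega)

lemma pvAlt_odd (n : Int) (k : Nat) (hn : n = 2 * k + 1) :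
    solve_alt n = ((k : Int) + 1) :: pvFlat n k := by
  unfold solve_alt
  apply PySem.List.sorted_eq_of_perm_of_pairwise_lt
  · refine ((pvFlat_perm n k (by omega)).cons _).trans ?_
    refine (List.perm_middle.symm).trans ?_
    rw [show n + 1 - (k:Int) = (k:Int) + 1 + 1 by omega,
        ← PySem.List.pyRange_one_cons (by omega : (k:Int) + 1 < n + 1),
        ← PySem.List.pyRange_one_append 1 ((k:Int)+1) (n+1) (by omega) (by omega)]
  · refine List.Pairwise.cons ?_ (pvFlat_pairwise n k (by omega))
    intro y hy
    have hb := pvFlat_bound n k (by omega) y hy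
    rw [Prod.Lex.lt_iff]
    left
    show |2 * ((k:Int) + 1) - (n + 1)| < |2 * y - (n + 1)|
    rw [show 2 * ((k:Int) + 1) - (n + 1) = 0 by omega, abs_zero]
    omega

-- ===== VERDICT (by name: the statement is the Claim_ definition above) =====
theorem solve_spec : Claim_unchanged_solve := by
  intro n _ hD
  unfold D_solve at hD
  rcases (by omega : n < 0 ∨ 0 ≤ n) with hneg | hpos
  · -- n negative: ¬D forces 2 ∣ n, both sides []
    have hdvd : 2 ∣ n := by tauto
    have hm : PySem.Int.mod n 2 = 0 := (PySem.Int.mod_eq_zero_iff_dvd n 2).mpr hdvd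
    have hf : PySem.Int.floordiv n 2 < 0 := by
      rw [PySem.Int.floordiv_eq_ediv_of_pos (by omega)]; omega
    unfold solve
    rw [if_pos hm, pvRange_desc, Int.toNat_of_nonpos (by omega)]
    unfold solve_alt
    rw [pvRange_nil (by omega : n + 1 ≤ 1)]
    rfl
  · rcases Int.even_or_odd n with ⟨m, hm⟩ | ⟨m, hm⟩
    · -- even: n = 2k
      obtain ⟨k, hk⟩ : ∃ k : Nat, n = 2 * k := ⟨m.toNat, by omega⟩
      have hmod : PySem.Int.mod n 2 = 0 := (PySem.Int.mod_eq_zero_iff_dvd n 2).mpr ⟨k, by omega⟩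
      have hfl : PySem.Int.floordiv n 2 = (k : Int) := by
        rw [PySem.Int.floordiv_eq_ediv_of_pos (by omega)]; omega
      unfold solve
      rw [if_pos hmod, hfl, pvLoop_eq, List.nil_append, pvAlt_even n k hk]
    · -- odd: n = 2k+1
      obtain ⟨k, hk⟩ : ∃ k : Nat, n = 2 * k + 1 := ⟨m.toNat, by omega⟩
      have hmod : PySem.Int.mod n 2 ≠ 0 := by
        rw [Ne, PySem.Int.mod_eq_zero_iff_dvd]; omega
      have hfl : PySem.Int.floordiv n 2 = (k : Int) := by
        rw [PySem.Int.floordiv_eq_ediv_of_pos (by omega)]; omega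
      have hmid : PySem.Int.floordiv (n + 1) 2 = (k : Int) + 1 := by
        rw [PySem.Int.floordiv_eq_ediv_of_pos (by omega)]; omega
      unfold solve
      rw [if_neg hmod, hfl, hmid, pvLoop_eq, pvAlt_odd n k hk]
      rfl

theorem solve_changed : Claim_changed_solve := by unfold Claim_changed_solve; decide

theorem solve_tight : Claim_exact_solve := by
  intro n _ ⟨hneg, hodd⟩
  have hmod : PySem.Int.mod n 2 ≠ 0 := by
    rw [Ne, PySem.Int.mod_eq_zero_iff_dvd]; exact hodd
  have hf : PySem.Int.floordiv n 2 < 0 := by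
    rw [PySem.Int.floordiv_eq_ediv_of_pos (by omega)]; omega
  unfold solve solve_alt
  rw [if_neg hmod, pvRange_desc, Int.toNat_of_nonpos (by omega),
      pvRange_nil (by omega : n + 1 ≤ 1)]
  simp [PySem.List.sorted]
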